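-- pv_equiv track=rewrite | github.com/CCHS-Computer-Science-Honors-Society/easynotecards-scrapper | scraper/extract.py | parse_front_and_options
-- ===== SOURCE A (Python) =====
-- def parse_front_and_options(full_text):
--     """
--     Parses the full text to separate the front (question) and options.
--
--     :param full_text: The complete text extracted from the question.
--     :return: A tuple containing the front text and a list of options.
--     """
--     lines = [line.strip() for line in full_text.split('\n') if line.strip()]
--     front = ""
--     options = []
--     current_option = ""
--     option_labels = ['A)', 'B)', 'C)', 'D)', 'E)']
--     contains_image_reference = False
--
--     for line in lines:
--         if "SEE IMAGE FOR CHOICES" in line.upper():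
--             contains_image_reference = True
--             break
--         if any(line.startswith(label) for label in option_labels):
--             if current_option:
--                 options.append(current_option.strip())
--             current_option = line
--         else:
--             if current_option:
--                 current_option += " " + line
--             else:
--                 front += line + " "
--
--     if current_option:
--         options.append(current_option.strip())
--
--     front = front.strip()
--
--     if contains_image_reference:
--         options = ["[See image for choices]"]
--
--     return front, options
-- ===== SOURCE B (Python) =====
-- def parse_front_and_options(full_text):
--     """
--     Parses the full text to separate the front (question) and options.
--
--     :param full_text: The complete text extracted from the question.
--     :return: A tuple containing the front text and a list of options.
--     """
--     lines = [ln.strip() for ln in full_text.split('\n') if ln.strip()]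
--     n = len(lines)
--     labels = ('A)', 'B)', 'C)', 'D)', 'E)')
--     image_idx = next((i for i, l in enumerate(lines)
--                       if 'SEE IMAGE FOR CHOICES' in l.upper()), n)
--     label_idx = next((i for i, l in enumerate(lines) if l.startswith(labels)), n)
--     front = ' '.join(lines[:min(image_idx, label_idx)]).strip()
--     if image_idx < n:
--         return front, ['[See image for choices]']
--
--     def group(ls):
--         if not ls:
--             return []
--         cut = next((k for k in range(1, len(ls)) if ls[k].startswith(labels)),
--                    len(ls))
--         return [' '.join(ls[:cut]).strip()] + group(ls[cut:])
--
--     return front, group(lines[label_idx:])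
-- ===== Notes on version B (the rewrite author's own statement) =====
-- stated objective: alternative
-- what changed: A's single stateful loop (front/options/current_option accumulators with a break flag) is replaced by an index-based decomposition: find the image and first-label cut points with next(), take the front as one slice-join, and build options by recursively splitting the tail at label positions and joining each slice.
import Mathlib
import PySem

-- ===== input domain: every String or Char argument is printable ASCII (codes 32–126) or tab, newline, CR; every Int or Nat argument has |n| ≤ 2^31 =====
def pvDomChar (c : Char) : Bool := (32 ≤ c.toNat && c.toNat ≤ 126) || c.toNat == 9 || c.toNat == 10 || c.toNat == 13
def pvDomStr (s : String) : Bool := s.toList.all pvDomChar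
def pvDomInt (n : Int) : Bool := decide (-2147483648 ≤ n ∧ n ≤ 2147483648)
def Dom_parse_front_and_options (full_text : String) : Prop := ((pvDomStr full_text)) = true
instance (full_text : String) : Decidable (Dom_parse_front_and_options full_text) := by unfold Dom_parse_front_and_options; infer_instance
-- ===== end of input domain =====

-- B replaces A's single stateful accumulator loop by an index-based decomposition:
-- find the image/first-label cut points, take the front as one slice-join, and group the
-- option lines by splitting at label positions (objective: alternative decomposition, same cost).

-- ===== PORT A =====
def pvLabels : List String := ["A)", "B)", "C)", "D)", "E)"]

def pvIsLabel (line : String) : Bool :=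
  -- any(line.startswith(label) for label in option_labels)
  pvLabels.any (fun lab => PySem.Str.startswith line lab)

def pvHasImage (line : String) : Bool :=
  -- "SEE IMAGE FOR CHOICES" in line.upper()
  PySem.Str.isIn "SEE IMAGE FOR CHOICES" (PySem.Str.upper line)

/-- The `for line in lines` loop of A; the `break` returns with the flag set to `true`. -/
def pvLoopA : List String → String → List String → String → String × List String × String × Bool
  | [], front, options, cur => (front, options, cur, false)
  | line :: rest, front, options, cur =>
    if pvHasImage line then (front, options, cur, true)
    else if pvIsLabel line then
      pvLoopA rest front (if cur ≠ "" then options ++ [PySem.Str.strip cur] else options) line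
    else if cur ≠ "" then pvLoopA rest front options (cur ++ " " ++ line)
    else pvLoopA rest (front ++ line ++ " ") options cur

def parse_front_and_options (full_text : String) : String × List String :=
  let lines := (((PySem.Str.split? full_text "\n").getD []).filter
      (fun line => PySem.Str.strip line ≠ "")).map PySem.Str.strip
  match pvLoopA lines "" [] "" with
  | (front, options, cur, img) =>
    let options := if cur ≠ "" then options ++ [PySem.Str.strip cur] else options
    (PySem.Str.strip front, if img then ["[See image for choices]"] else options)

-- ===== PORT B =====
-- (B's label/image tests are the same predicates as A's: pvIsLabel / pvHasImage above)

/-- `group(ls)`: cut = position of the first label line in ls[1:] plus one (else len(ls));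
    emit ' '.join(ls[:cut]).strip() and recurse on ls[cut:].
    (slices with nonnegative bounds: take/drop, exact.) -/
def pvGroupB : List String → List String
  | [] => []
  | l0 :: t =>
    let cut := ((t.findIdx? pvIsLabel).getD t.length) + 1
    PySem.Str.strip (PySem.Str.join " " ((l0 :: t).take cut)) :: pvGroupB ((l0 :: t).drop cut)
termination_by ls => ls.length
decreasing_by simp

def parse_front_and_options_alt (full_text : String) : String × List String :=
  let lines := (((PySem.Str.split? full_text "\n").getD []).filter
      (fun line => PySem.Str.strip line ≠ "")).map PySem.Str.strip
  let n := lines.length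
  -- next((i for i, l in enumerate(lines) if …), n)  =  first index satisfying the test, else n
  let imageIdx := (lines.findIdx? pvHasImage).getD n
  let labelIdx := (lines.findIdx? pvIsLabel).getD n
  let front := PySem.Str.strip (PySem.Str.join " " (lines.take (min imageIdx labelIdx)))
  if imageIdx < n then (front, ["[See image for choices]"])
  else (front, pvGroupB (lines.drop labelIdx))

-- ===== PRECONDITION & SPEC =====
def Spec_parse_front_and_options (full_text : String) (out : String × List String) : Prop := out = parse_front_and_options_alt full_text
instance (full_text : String) (out : String × List String) : Decidable (Spec_parse_front_and_options full_text out) := by unfold Spec_parse_front_and_options; infer_instance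

-- ===== CLAIM (what is proved, stated in full; the proofs are below) =====
def Claim_equal_parse_front_and_options : Prop := ∀ (full_text : String), Dom_parse_front_and_options full_text → Spec_parse_front_and_options full_text (parse_front_and_options full_text)

-- ===== LEMMAS AND PROOFS =====

-- proof-only abbreviations
def pvImgIdx (lines : List String) : Nat := (lines.findIdx? pvHasImage).getD lines.length
def pvLabIdx (lines : List String) : Nat := (lines.findIdx? pvIsLabel).getD lines.length

/-- A's post-loop processing, as a function of the loop's final state. -/
def pvPost : String × List String × String × Bool → String × List String
  | (front, options, cur, img) =>
    (PySem.Str.strip front,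
     if img then ["[See image for choices]"]
     else if cur ≠ "" then options ++ [PySem.Str.strip cur] else options)

/-- The groups A's loop builds from state `cur` (≠ "") over the remaining lines, unstripped. -/
def pvSegGroups : List String → String → List String
  | [], c => [c]
  | l :: rest, c =>
    if pvIsLabel l then c :: pvSegGroups rest l else pvSegGroups rest (c ++ " " ++ l)

/-- A's front accumulation: each line followed by one space. -/
def pvJoinSp : List String → String
  | [] => ""
  | l :: rest => l ++ " " ++ pvJoinSp rest

def pvOptsOf (lines : List String) : List String :=
  match lines.drop (pvLabIdx lines) with
  | [] => []
  | h :: t => (pvSegGroups t h).map PySem.Str.strip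

theorem pvLabel_ne_empty {l : String} (h : pvIsLabel l = true) : l ≠ "" := by
  rintro rfl; exact absurd h (by decide)

theorem pvMid_ne_empty (s l : String) : s ++ " " ++ l ≠ "" := by
  intro h
  have := congrArg String.toList h
  simp at this


theorem pvStrip_append_space (s : String) :
    PySem.Str.strip (s ++ " ") = PySem.Str.strip s := by
  apply String.toList_inj.mp
  simp only [PySem.Str.toList_strip, String.toList_append]
  show PySem.Chars.strip (s.toList ++ [' ']) = PySem.Chars.strip s.toList
  unfold PySem.Chars.strip PySem.Chars.lstrip PySem.Chars.rstrip
  rw [List.dropWhile_append]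
  rcases eq_or_ne (List.dropWhile PySem.Chars.isspace s.toList) [] with h' | h'
  · rw [if_pos (by simp [h'])]
    rw [h']
    decide
  · rw [if_neg (by simp [h'])]
    rw [List.reverse_append]
    simp [show PySem.Chars.isspace ' ' = true from rfl]

theorem pvJoin_cons_cons (a b : String) (r : List String) :
    PySem.Str.join " " (a :: b :: r) = a ++ " " ++ PySem.Str.join " " (b :: r) := by
  apply String.toList_inj.mp
  simp only [PySem.Str.toList_join, String.toList_append, List.map_cons]
  exact PySem.Chars.join_cons_cons _ _ _ _

theorem pvJoin_singleton (a : String) : PySem.Str.join " " [a] = a := by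
  apply String.toList_inj.mp
  simp only [PySem.Str.toList_join, List.map_cons, List.map_nil]
  exact PySem.Chars.join_singleton _ _

theorem pvJoin_nil : PySem.Str.join " " [] = "" := by
  apply String.toList_inj.mp
  simp [PySem.Str.toList_join, PySem.Chars.join, List.intercalate]

theorem pvJoinSp_cons_eq (a : String) (r : List String) :
    pvJoinSp (a :: r) = PySem.Str.join " " (a :: r) ++ " " := by
  induction r generalizing a with
  | nil => simp [pvJoinSp, pvJoin_singleton]
  | cons b r ih => rw [pvJoinSp, ih b, pvJoin_cons_cons]; simp [String.append_assoc]

theorem pvJoinSp_eq (pre : List String) :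
    PySem.Str.strip (pvJoinSp pre) = PySem.Str.strip (PySem.Str.join " " pre) := by
  cases pre with
  | nil => rw [pvJoin_nil]; rfl
  | cons a r => rw [pvJoinSp_cons_eq, pvStrip_append_space]

theorem pvImgIdx_cons_true {l : String} (rest : List String) (h : pvHasImage l = true) :
    pvImgIdx (l :: rest) = 0 := by
  simp [pvImgIdx, List.findIdx?_cons, h]

theorem pvImgIdx_cons_false {l : String} (rest : List String) (h : pvHasImage l = false) :
    pvImgIdx (l :: rest) = pvImgIdx rest + 1 := by
  cases h' : rest.findIdx? pvHasImage <;>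
    simp [pvImgIdx, List.findIdx?_cons, h, h']

theorem pvLabIdx_cons_true {l : String} (rest : List String) (h : pvIsLabel l = true) :
    pvLabIdx (l :: rest) = 0 := by
  simp [pvLabIdx, List.findIdx?_cons, h]

theorem pvLabIdx_cons_false {l : String} (rest : List String) (h : pvIsLabel l = false) :
    pvLabIdx (l :: rest) = pvLabIdx rest + 1 := by
  cases h' : rest.findIdx? pvIsLabel <;>
    simp [pvLabIdx, List.findIdx?_cons, h, h']

/-- Phase 2: once `cur ≠ ""`, the front is frozen and the loop just builds groups
    (or breaks on an image line). -/
theorem pvPhase2 (lines : List String) :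
    ∀ (f : String) (o : List String) (c : String), c ≠ "" →
    pvPost (pvLoopA lines f o c) =
      (PySem.Str.strip f,
       if pvImgIdx lines < lines.length then ["[See image for choices]"]
       else o ++ (pvSegGroups lines c).map PySem.Str.strip) := by
  induction lines with
  | nil =>
    intro f o c hc
    simp [pvLoopA, pvPost, pvImgIdx, pvSegGroups, hc]
  | cons l rest ih =>
    intro f o c hc
    rw [pvLoopA]
    cases himg : pvHasImage l with
    | true =>
      rw [if_pos rfl]
      simp [pvPost, pvImgIdx_cons_true rest himg]
    | false =>
      rw [if_neg (by simp)]
      rw [pvImgIdx_cons_false rest himg] at *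
      cases hlab : pvIsLabel l with
      | true =>
        rw [if_pos rfl, if_pos hc]
        rw [ih f (o ++ [PySem.Str.strip c]) l (pvLabel_ne_empty hlab)]
        simp [pvSegGroups, hlab]
      | false =>
        rw [if_neg (by simp), if_pos hc]
        rw [ih f o (c ++ " " ++ l) (pvMid_ne_empty c l)]
        simp [pvSegGroups, hlab]

/-- Phase 1: from the initial state, front accumulates up to the first image/label line. -/
theorem pvPhase1 (lines : List String) :
    ∀ (f : String),
    pvPost (pvLoopA lines f [] "") =
      (PySem.Str.strip (f ++ pvJoinSp (lines.take (min (pvImgIdx lines) (pvLabIdx lines)))),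
       if pvImgIdx lines < lines.length then ["[See image for choices]"]
       else pvOptsOf lines) := by
  induction lines with
  | nil =>
    intro f
    simp [pvLoopA, pvPost, pvImgIdx, pvLabIdx, pvOptsOf, pvJoinSp]
  | cons l rest ih =>
    intro f
    rw [pvLoopA]
    cases himg : pvHasImage l with
    | true =>
      rw [if_pos rfl]
      simp [pvPost, pvImgIdx_cons_true rest himg, pvJoinSp]
    | false =>
      rw [if_neg (by simp)]
      cases hlab : pvIsLabel l with
      | true =>
        rw [if_pos rfl, if_neg (by simp)]
        rw [pvPhase2 rest f [] l (pvLabel_ne_empty hlab)]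
        rw [pvImgIdx_cons_false rest himg, pvLabIdx_cons_true rest hlab]
        simp [pvOptsOf, pvLabIdx_cons_true rest hlab, pvJoinSp]
      | false =>
        rw [if_neg (by simp), if_neg (by simp)]
        rw [ih (f ++ l ++ " ")]
        rw [pvImgIdx_cons_false rest himg, pvLabIdx_cons_false rest hlab]
        have hopts : pvOptsOf (l :: rest) = pvOptsOf rest := by
          unfold pvOptsOf
          rw [pvLabIdx_cons_false rest hlab, List.drop_succ_cons]
        rw [hopts, Nat.succ_min_succ]
        simp [pvJoinSp, String.append_assoc]

theorem pvTakeIdx (t : List String) :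
    t.take ((t.findIdx? pvIsLabel).getD t.length) = t.takeWhile (fun l => !pvIsLabel l) ∧
    t.drop ((t.findIdx? pvIsLabel).getD t.length) = t.dropWhile (fun l => !pvIsLabel l) := by
  induction t with
  | nil => simp
  | cons l t ih =>
    cases hlab : pvIsLabel l with
    | true => simp [List.findIdx?_cons, hlab]
    | false =>
      cases h' : t.findIdx? pvIsLabel with
      | none =>
        obtain ⟨ih1, ih2⟩ := ih
        rw [h'] at ih1 ih2
        simp only [Option.getD_none] at ih1 ih2
        simp [List.findIdx?_cons, hlab, h', ih1, ih2]
      | some m =>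
        obtain ⟨ih1, ih2⟩ := ih
        rw [h'] at ih1 ih2
        simp only [Option.getD_some] at ih1 ih2
        simp [List.findIdx?_cons, hlab, h', ih1, ih2]

theorem pvSegGroups_split : ∀ (t : List String) (c : String),
    pvSegGroups t c =
      (List.foldl (fun s l => s ++ " " ++ l) c (t.takeWhile (fun l => !pvIsLabel l))) ::
      (match t.dropWhile (fun l => !pvIsLabel l) with
       | [] => []
       | h :: t' => pvSegGroups t' h) := by
  intro t
  induction t with
  | nil => intro c; simp [pvSegGroups]
  | cons l t ih =>
    intro c
    cases hlab : pvIsLabel l with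
    | true => simp [pvSegGroups, hlab]
    | false =>
      rw [pvSegGroups, if_neg (by simp [hlab]), ih (c ++ " " ++ l)]
      simp [hlab]

theorem pvJoin_glue (c b : String) (r : List String) :
    PySem.Str.join " " ((c ++ " " ++ b) :: r) = c ++ " " ++ PySem.Str.join " " (b :: r) := by
  cases r with
  | nil => rw [pvJoin_singleton, pvJoin_singleton]
  | cons d r => rw [pvJoin_cons_cons, pvJoin_cons_cons]; simp [String.append_assoc]

theorem pvFoldl_join : ∀ (body : List String) (c : String),
    List.foldl (fun s l => s ++ " " ++ l) c body = PySem.Str.join " " (c :: body) := by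
  intro body
  induction body with
  | nil => intro c; exact (pvJoin_singleton c).symm
  | cons b r ih =>
    intro c
    rw [List.foldl_cons, ih (c ++ " " ++ b), pvJoin_glue]
    exact (pvJoin_cons_cons c b r).symm

theorem pvSegGroups_groupB : ∀ (N : Nat) (t : List String) (h : String),
    t.length ≤ N → (pvSegGroups t h).map PySem.Str.strip = pvGroupB (h :: t) := by
  intro N
  induction N with
  | zero =>
    intro t h ht
    have : t = [] := List.eq_nil_of_length_eq_zero (Nat.le_zero.mp ht)
    subst this
    simp [pvSegGroups, pvGroupB, pvJoin_singleton]
  | succ N ihN =>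
    intro t h ht
    rw [pvSegGroups_split, pvGroupB]
    obtain ⟨htake, hdrop⟩ := pvTakeIdx t
    have hTake1 : (h :: t).take ((t.findIdx? pvIsLabel).getD t.length + 1)
        = h :: t.takeWhile (fun l => !pvIsLabel l) := by
      simp [List.take_succ_cons, htake]
    have hDrop1 : (h :: t).drop ((t.findIdx? pvIsLabel).getD t.length + 1)
        = t.dropWhile (fun l => !pvIsLabel l) := by
      simp [List.drop_succ_cons, hdrop]
    rw [hTake1, hDrop1]
    rw [List.map_cons, pvFoldl_join]
    congr 1
    cases hd : t.dropWhile (fun l => !pvIsLabel l) with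
    | nil => simp [pvGroupB]
    | cons h' t' =>
      have hlen : t'.length ≤ N := by
        have h1 : (t.dropWhile (fun l => !pvIsLabel l)).length ≤ t.length :=
          List.length_dropWhile_le _ _
        rw [hd] at h1
        simp at h1
        omega
      exact ihN t' h' hlen

theorem pvOptsOf_eq_groupB (lines : List String) :
    pvOptsOf lines = pvGroupB (lines.drop (pvLabIdx lines)) := by
  cases hd : lines.drop (pvLabIdx lines) with
  | nil => simp [pvOptsOf, hd, pvGroupB]
  | cons h t => rw [pvOptsOf, hd]; exact pvSegGroups_groupB t.length t h le_rfl

-- ===== VERDICT (by name: the statement is the Claim_ definition above) =====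
theorem parse_front_and_options_spec : Claim_equal_parse_front_and_options := by
  intro full_text _
  unfold Spec_parse_front_and_options parse_front_and_options parse_front_and_options_alt
  set lines := (((PySem.Str.split? full_text "\n").getD []).filter
      (fun line => PySem.Str.strip line ≠ "")).map PySem.Str.strip with hlines
  have hP := pvPhase1 lines ""
  rcases hL : pvLoopA lines "" [] "" with ⟨f, o, c, i⟩
  rw [hL] at hP
  unfold pvPost at hP
  rw [Prod.mk.injEq] at hP
  obtain ⟨hfront, hopts⟩ := hP
  simp only []
  rw [hL]
  simp only [hfront, hopts]
  rw [String.empty_append] at *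
  rw [pvJoinSp_eq]
  rw [pvOptsOf_eq_groupB]
  simp only [pvImgIdx, pvLabIdx]
  split_ifs <;> rfl
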